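-- pv_equiv track=rewrite | github.com/Elder19/ING-COMPUTACION | intro y taller semestre 1/taller/labs-examen/Examen1.py | formarNumero
-- ===== SOURCE A (Python) =====
-- def  formarNumero(lista):
--     resultado=0
--     contador=0
--     if isinstance (lista,list):
--         for elemento in lista:
--             if elemento<0:
--                 elemento*=-1
--                 contador=1
--             if elemento == 0:
--                 resultado=resultado*10+elemento
--             if elemento!=0:
--                 potencia=largon(elemento)
--                 resultado=resultado*(10**potencia)+elemento
--
--         if contador == 1:
--             resultado *=-1
--
--
--         return resultado
--     else:
--         return "el parametro debe ser una lista"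
--
-- def largon(num):
--     contador=0
--     if num==0:
--         contador+=1
--     else:
--         while num!=0:
--             contador+=1
--             num//=10
--     return contador
-- ===== SOURCE B (Python) =====
-- def formarNumero(lista):
--     if not isinstance(lista, list):
--         return "el parametro debe ser una lista"
--     mag = 0
--     mult = 1
--     for e in reversed(lista):
--         a = -e if e < 0 else e
--         mag += a * mult
--         mult *= pow_len(a)
--     return -mag if any(e < 0 for e in lista) else mag
--
-- def pow_len(a):
--     # 10 ** (number of decimal digits of a), for a >= 0
--     return 10 if a < 10 else 10 * pow_len(a // 10)
-- ===== Notes on version B (the rewrite author's own statement) =====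
-- stated objective: alternative
-- what changed: Replaces A's forward loop (digit-count helper largon + shift by 10**count each step, plus a sign flag patched in at the end) by a single back-to-front pass with a running place-value multiplier, a recursive 10**digits helper, and any() for the sign.
import Mathlib
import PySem

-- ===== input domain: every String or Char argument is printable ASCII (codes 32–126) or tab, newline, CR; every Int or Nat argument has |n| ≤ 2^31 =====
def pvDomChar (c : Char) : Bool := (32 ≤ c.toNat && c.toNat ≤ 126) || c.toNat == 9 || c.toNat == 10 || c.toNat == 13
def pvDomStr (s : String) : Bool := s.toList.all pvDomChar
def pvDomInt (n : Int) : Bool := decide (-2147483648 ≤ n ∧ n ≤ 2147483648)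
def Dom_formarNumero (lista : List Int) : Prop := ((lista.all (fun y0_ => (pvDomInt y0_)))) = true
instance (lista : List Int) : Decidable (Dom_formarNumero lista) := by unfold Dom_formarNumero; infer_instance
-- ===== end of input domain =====

-- B replaces A's per-element digit-count + power arithmetic by a single back-to-front
-- pass with a running multiplier (objective: alternative, same cost, plainer accumulation).
-- The isinstance guard of the Python sources is vacuous under the List Int signature.

-- ===== PORT A =====
-- helper: while num != 0: contador += 1; num //= 10.  Exact for num ≥ 0 (the only values
-- A ever passes: largon is called with elemento > 0); on negative num Python's loop does
-- not terminate, so the guard is written num ≤ 0 to make the Lean function total.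
def largonAux (num : Int) (contador : Nat) : Nat :=
  if h : num ≤ 0 then contador
  else largonAux (PySem.Int.floordiv num 10) (contador + 1)
termination_by num.toNat
decreasing_by
  have h10 : PySem.Int.floordiv num 10 = num / 10 :=
    PySem.Int.floordiv_eq_ediv_of_pos (by omega)
  rw [h10]; omega

def largon (num : Int) : Nat :=
  if num = 0 then 1 else largonAux num 0

def formarNumero (lista : List Int) : Int :=
  let s := lista.foldl
    (fun (s : Int × Int) elemento₀ =>
      let elemento := if elemento₀ < 0 then -elemento₀ else elemento₀
      let contador := if elemento₀ < 0 then (1 : Int) else s.2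
      let r₁ := if elemento = 0 then s.1 * 10 + elemento else s.1
      let r₂ := if elemento ≠ 0 then r₁ * 10 ^ largon elemento + elemento else r₁
      (r₂, contador))
    ((0 : Int), (0 : Int))
  if s.2 = 1 then s.1 * (-1) else s.1

-- ===== PORT B =====
-- helper pow_len: 10 if a < 10 else 10 * pow_len(a // 10)
def powLen (a : Int) : Int :=
  if h : a < 10 then 10
  else 10 * powLen (PySem.Int.floordiv a 10)
termination_by a.toNat
decreasing_by
  have h10 : PySem.Int.floordiv a 10 = a / 10 :=
    PySem.Int.floordiv_eq_ediv_of_pos (by omega)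
  rw [h10]; omega

def formarNumero_alt (lista : List Int) : Int :=
  let s := lista.reverse.foldl
    (fun (s : Int × Int) e =>
      let a := if e < 0 then -e else e
      (s.1 + a * s.2, s.2 * powLen a))
    ((0 : Int), (1 : Int))
  if lista.any (fun e => decide (e < 0)) then -s.1 else s.1

-- ===== PRECONDITION & SPEC =====
def Spec_formarNumero (lista : List Int) (out : Int) : Prop := out = formarNumero_alt lista
instance (lista : List Int) (out : Int) : Decidable (Spec_formarNumero lista out) := by unfold Spec_formarNumero; infer_instance

-- ===== CLAIM (what is proved, stated in full; the proofs are below) =====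
def Claim_equal_formarNumero : Prop := ∀ (lista : List Int), Dom_formarNumero lista → Spec_formarNumero lista (formarNumero lista)

-- ===== LEMMAS AND PROOFS =====

-- |e| as both ports compute it
def absI (e : Int) : Int := if e < 0 then -e else e

lemma absI_nonneg (e : Int) : 0 ≤ absI e := by
  unfold absI; split <;> omega

-- 10 ^ largon a = powLen a for a ≥ 0
lemma largonAux_pow (k : Nat) : ∀ (n : Int) (c : Nat), n.toNat ≤ k → 0 < n →
    (10 : Int) ^ largonAux n c = powLen n * 10 ^ c := by
  induction k with
  | zero => intro n c hk hn; omega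
  | succ k ih =>
    intro n c hk hn
    have hdiv : PySem.Int.floordiv n 10 = n / 10 :=
      PySem.Int.floordiv_eq_ediv_of_pos (by omega)
    rw [largonAux]
    simp only [show ¬ n ≤ 0 by omega, dite_false]
    by_cases h10 : n < 10
    · have hz : n / 10 = 0 := by omega
      rw [largonAux, hdiv, hz]
      simp only [le_refl, dite_true]
      rw [powLen]
      simp only [h10, dite_true]
      ring
    · have hpos : 0 < n / 10 := by omega
      have hlt : (n / 10).toNat ≤ k := by omega
      rw [hdiv, ih (n / 10) (c + 1) hlt hpos]
      conv_rhs => rw [powLen]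
      rw [dif_neg h10, hdiv]
      ring

lemma pow_largon (a : Int) (ha : 0 < a) : (10 : Int) ^ largon a = powLen a := by
  unfold largon
  simp only [show a ≠ 0 by omega, if_false]
  have := largonAux_pow a.toNat a 0 (le_refl _) ha
  simpa using this

lemma powLen_zero : powLen 0 = 10 := by rw [powLen]; simp

-- A's per-element magnitude update is r * powLen |e| + |e|
lemma stepA_eq (r e : Int) :
    (let a := absI e
     let r₁ := if a = 0 then r * 10 + a else r
     if a ≠ 0 then r₁ * 10 ^ largon a + a else r₁) = r * powLen (absI e) + absI e := by
  have ha := absI_nonneg e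
  by_cases h : absI e = 0
  · simp [h, powLen_zero]
  · have hpos : 0 < absI e := by omega
    simp [h, pow_largon _ hpos]

-- A's magnitude loop, abstracted
def aMag (lista : List Int) : Int :=
  lista.foldl (fun r e => r * powLen (absI e) + absI e) 0

lemma aMag_append (l : List Int) (x : Int) :
    aMag (l ++ [x]) = aMag l * powLen (absI x) + absI x := by
  unfold aMag; rw [List.foldl_append]; rfl

-- A's contador loop
lemma contador_eq (l : List Int) : ∀ c : Int,
    l.foldl (fun c e => if e < 0 then (1 : Int) else c) c =
      if l.any (fun e => decide (e < 0)) then 1 else c := by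
  induction l with
  | nil => intro c; simp
  | cons x t ih =>
    intro c
    simp only [List.foldl_cons, List.any_cons, ih]
    by_cases hx : x < 0 <;> simp [hx]

-- B's loop computes m + u * aMag of the reversed list, and the running multiplier
lemma bFold (l : List Int) : ∀ (m u : Int),
    l.foldl (fun (s : Int × Int) e =>
        let a := if e < 0 then -e else e
        (s.1 + a * s.2, s.2 * powLen a)) (m, u) =
      (m + u * aMag l.reverse, u * (l.map (fun e => powLen (absI e))).prod) := by
  induction l with
  | nil => intro m u; simp [aMag]
  | cons x t ih =>
    intro m u
    simp only [List.foldl_cons, ih, List.reverse_cons, List.map_cons, List.prod_cons]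
    rw [aMag_append]
    simp only [Prod.mk.injEq, absI]
    constructor <;> ring

-- A's whole fold splits into the two independent accumulators
lemma aFold_eq (lista : List Int) :
    lista.foldl
      (fun (s : Int × Int) elemento₀ =>
        let elemento := if elemento₀ < 0 then -elemento₀ else elemento₀
        let contador := if elemento₀ < 0 then (1 : Int) else s.2
        let r₁ := if elemento = 0 then s.1 * 10 + elemento else s.1
        let r₂ := if elemento ≠ 0 then r₁ * 10 ^ largon elemento + elemento else r₁
        (r₂, contador))
      ((0 : Int), (0 : Int)) =
    (aMag lista, if lista.any (fun e => decide (e < 0)) then 1 else 0) := by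
  have h := PySem.List.foldl_prod_mk
      (f := fun (r : Int) (e : Int) => r * powLen (absI e) + absI e)
      (g := fun (c : Int) (e : Int) => if e < 0 then (1 : Int) else c)
      (l := lista) (a := (0 : Int)) (b := (0 : Int))
  rw [show (fun (s : Int × Int) (elemento₀ : Int) =>
        let elemento := if elemento₀ < 0 then -elemento₀ else elemento₀
        let contador := if elemento₀ < 0 then (1 : Int) else s.2
        let r₁ := if elemento = 0 then s.1 * 10 + elemento else s.1
        let r₂ := if elemento ≠ 0 then r₁ * 10 ^ largon elemento + elemento else r₁
        (r₂, contador)) =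
      (fun (s : Int × Int) (e : Int) =>
        (s.1 * powLen (absI e) + absI e, if e < 0 then (1 : Int) else s.2)) from by
    funext s e
    have := stepA_eq s.1 e
    simp only [absI] at this ⊢
    rw [← this]]
  rw [h, contador_eq]
  rfl

-- ===== VERDICT (by name: the statement is the Claim_ definition above) =====
theorem formarNumero_spec : Claim_equal_formarNumero := by
  intro lista _
  unfold Spec_formarNumero formarNumero formarNumero_alt
  rw [aFold_eq, bFold]
  simp only [List.reverse_reverse]
  by_cases h : lista.any (fun e => decide (e < 0)) <;> simp [h]
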